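-- pv_equiv track=rewrite | github.com/icacedo/splicing | arch/mdev/models.py | splice_sites
-- ===== SOURCE A (Python) =====
-- def splice_sites(seqs):
--
-- 	seq_don_sites = []
-- 	seq_acc_sites = []
-- 	seq_lens = []
-- 	for i in range(len(seqs)):
-- 		d_sites = []
-- 		a_sites = []
-- 		for j in range(len(seqs[i])):
-- 			if seqs[i][j:j+2]=='GT':
-- 				d_sites.append(j)
-- 			if seqs[i][j:j+2]=='AG':
-- 				a_sites.append(j+1)
-- 			else: continue
-- 		seq_don_sites.append(d_sites)
-- 		seq_acc_sites.append(a_sites)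
-- 		seq_lens.append(len(seqs[i]))
--
-- 	return seq_don_sites, seq_acc_sites, seq_lens
-- ===== SOURCE B (Python) =====
-- def _occ(seq, pat):
--     out = []
--     p = seq.find(pat)
--     while p != -1:
--         out.append(p)
--         p = seq.find(pat, p + 1)
--     return out
--
--
-- def splice_sites(seqs):
--     seq_don_sites = []
--     seq_acc_sites = []
--     seq_lens = []
--     for seq in seqs:
--         seq_don_sites.append(_occ(seq, 'GT'))
--         seq_acc_sites.append([p + 1 for p in _occ(seq, 'AG')])
--         seq_lens.append(len(seq))
--     return seq_don_sites, seq_acc_sites, seq_lens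
-- ===== Notes on version B (the rewrite author's own statement) =====
-- stated objective: alternative
-- what changed: Replaces A's per-index scan that builds and compares a 2-character slice at every position with repeated str.find jumps that visit only the actual occurrences of 'GT'/'AG', collected by a helper; measured ~1.2-1.9x but not consistently above 1.5x, so no speed claim.
import Mathlib
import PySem

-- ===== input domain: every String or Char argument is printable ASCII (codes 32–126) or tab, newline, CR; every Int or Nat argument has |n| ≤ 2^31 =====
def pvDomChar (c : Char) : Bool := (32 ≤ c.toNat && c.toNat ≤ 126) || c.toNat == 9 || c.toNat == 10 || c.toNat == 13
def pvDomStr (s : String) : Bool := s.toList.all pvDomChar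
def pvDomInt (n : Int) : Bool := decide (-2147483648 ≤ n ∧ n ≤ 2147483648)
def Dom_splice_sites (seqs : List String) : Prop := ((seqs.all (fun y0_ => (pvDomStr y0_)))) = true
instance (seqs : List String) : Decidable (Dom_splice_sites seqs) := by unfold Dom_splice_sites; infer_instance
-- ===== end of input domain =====

-- B replaces A's per-index 2-character-slice scan with repeated find jumps to the next occurrence; equivalence is proved for all inputs.

-- ===== PORT A =====
def splice_sites (seqs : List String) : List (List Int) × List (List Int) × List Int :=
  (PySem.List.pyRange 0 (seqs.length : Int) 1).foldl (fun acc i =>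
    let s := PySem.List.pyGetD seqs i ""
    let da := (PySem.List.pyRange 0 (PySem.Str.len s) 1).foldl (fun p j =>
      let p := if PySem.Str.slice s (some j) (some (j + 2)) = "GT" then (p.1 ++ [j], p.2) else p
      if PySem.Str.slice s (some j) (some (j + 2)) = "AG" then (p.1, p.2 ++ [j + 1]) else p)
      ([], [])
    (acc.1 ++ [da.1], acc.2.1 ++ [da.2], acc.2.2 ++ [PySem.Str.len s]))
    ([], [], [])

-- ===== PORT B =====
-- the while loop of Source B's _occ; the fuel argument only makes the recursion structural (it is always sufficient)
def pvOccAux (s pat : String) (p : Int) : Nat → List Int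
  | 0 => []
  | f + 1 => if p = -1 then [] else p :: pvOccAux s pat (PySem.Str.findFrom s pat (p + 1) none) f

-- Source B's _occ
def pvOcc (s pat : String) : List Int := pvOccAux s pat (PySem.Str.find s pat) (s.toList.length + 1)

def splice_sites_alt (seqs : List String) : List (List Int) × List (List Int) × List Int :=
  seqs.foldl (fun acc s =>
    (acc.1 ++ [pvOcc s "GT"], acc.2.1 ++ [(pvOcc s "AG").map (· + 1)], acc.2.2 ++ [PySem.Str.len s]))
    ([], [], [])

-- ===== PRECONDITION & SPEC =====
def Spec_splice_sites (seqs : List String) (out : List (List Int) × List (List Int) × List Int) : Prop := out = splice_sites_alt seqs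
instance (seqs : List String) (out : List (List Int) × List (List Int) × List Int) : Decidable (Spec_splice_sites seqs out) := by unfold Spec_splice_sites; infer_instance

-- ===== CLAIM (what is proved, stated in full; the proofs are below) =====
def Claim_equal_splice_sites : Prop := ∀ (seqs : List String), Dom_splice_sites seqs → Spec_splice_sites seqs (splice_sites seqs)

-- ===== LEMMAS AND PROOFS =====

-- A's inner loop: a fold with a pair state where each component is append-if
lemma foldl_pair_append (l : List Int) (P Q : Int → Prop) [DecidablePred P] [DecidablePred Q] (d a : List Int) :
    l.foldl (fun p j =>
      let p := if P j then (p.1 ++ [j], p.2) else p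
      if Q j then (p.1, p.2 ++ [j + 1]) else p) (d, a)
    = (d ++ (l.filter (fun j => decide (P j))), a ++ (l.filter (fun j => decide (Q j))).map (· + 1)) := by
  induction l generalizing d a with
  | nil => simp
  | cons x xs ih =>
    simp only [List.foldl_cons, List.filter_cons]
    by_cases hP : P x <;> by_cases hQ : Q x <;> simp [hP, hQ, ih]

-- occurrences found by the find loop = the positions where pat is a prefix of the drop
lemma occAux_spec (s pat : String) (hpat : pat.toList ≠ []) (fuel : Nat) :
    ∀ (k : Nat), k ≤ s.toList.length → s.toList.length + 1 - k ≤ fuel →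
      pvOccAux s pat (PySem.Str.findFrom s pat (k : Int) none) fuel
        = (PySem.List.pyRange (k : Int) (s.toList.length : Int) 1).filter
            (fun j => decide (pat.toList <+: s.toList.drop j.toNat)) := by
  induction fuel with
  | zero => intro k hk hf; omega
  | succ f ih =>
    intro k hk hf
    have hfe : PySem.Str.findFrom s pat (k : Int) none = PySem.Chars.findFrom s.toList pat.toList (k : Int) none := by
      simp
    by_cases hr : PySem.Chars.findFrom s.toList pat.toList (k : Int) none = -1
    · have hno : ¬ pat.toList <:+: s.toList.drop k :=
        (PySem.Chars.findFrom_natCast_eq_neg_one_iff s.toList pat.toList k hk).mp hr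
      have lhs0 : pvOccAux s pat (PySem.Str.findFrom s pat (k : Int) none) (f + 1) = [] := by
        simp [pvOccAux, hr]
      rw [lhs0]
      symm
      rw [List.filter_eq_nil_iff]
      intro j hj
      have hmem := (PySem.List.mem_pyRange_one).mp hj
      simp only [decide_eq_true_eq]
      intro hpre
      apply hno
      have hjk : j.toNat = k + (j.toNat - k) := by omega
      have : s.toList.drop j.toNat = (s.toList.drop k).drop (j.toNat - k) := by
        rw [List.drop_drop, ← hjk]
      exact (this ▸ hpre).isInfix.trans ((List.drop_suffix _ _).isInfix)
    · obtain ⟨h1, h2, h3⟩ := PySem.Chars.findFrom_natCast_spec s.toList pat.toList k hk hr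
      set r := PySem.Chars.findFrom s.toList pat.toList (k : Int) none with hrdef
      have hr0 : (0 : Int) ≤ r := le_trans (by positivity) h1
      have hrn : r.toNat < s.toList.length := by
        have hne : s.toList.drop r.toNat ≠ [] := by
          intro hnil
          exact hpat (List.prefix_nil.mp (hnil ▸ h2))
        have := List.drop_eq_nil_iff.not.mp (by simpa using hne)
        omega
      have hkr : k ≤ r.toNat := by omega
      have hr1 : r + 1 = ((r.toNat + 1 : Nat) : Int) := by omega
      have lhs : pvOccAux s pat (PySem.Str.findFrom s pat (k : Int) none) (f + 1)
          = r :: pvOccAux s pat (PySem.Str.findFrom s pat (((r.toNat + 1 : Nat) : Int)) none) f := by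
        simp only [pvOccAux, hfe]
        rw [if_neg hr, hr1]
      rw [lhs, ih (r.toNat + 1) (by omega) (by omega)]
      have hempty : (PySem.List.pyRange (k : Int) (r.toNat : Int) 1).filter
          (fun j => decide (pat.toList <+: s.toList.drop j.toNat)) = [] := by
        rw [List.filter_eq_nil_iff]
        intro j hj
        have hmem := (PySem.List.mem_pyRange_one).mp hj
        simp only [decide_eq_true_eq]
        have hjk : k ≤ j.toNat ∧ j.toNat < r.toNat := by omega
        exact h3 j.toNat hjk.1 hjk.2
      have hsplit : (PySem.List.pyRange (k : Int) (s.toList.length : Int) 1).filter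
            (fun j => decide (pat.toList <+: s.toList.drop j.toNat))
          = r :: (PySem.List.pyRange ((r.toNat + 1 : Nat) : Int) (s.toList.length : Int) 1).filter
            (fun j => decide (pat.toList <+: s.toList.drop j.toNat)) := by
        rw [PySem.List.pyRange_one_append (k : Int) (r.toNat : Int) (s.toList.length : Int)
              (by omega) (by omega),
            List.filter_append, hempty,
            PySem.List.pyRange_one_cons (show ((r.toNat : Int)) < (s.toList.length : Int) by exact_mod_cast hrn),
            List.filter_cons]
        simp [h2, Int.toNat_of_nonneg hr0]
      rw [hsplit]

lemma occ_spec (s pat : String) (hpat : pat.toList ≠ []) :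
    pvOcc s pat = (PySem.List.pyRange 0 (s.toList.length : Int) 1).filter
      (fun j => decide (pat.toList <+: s.toList.drop j.toNat)) := by
  have h0 : PySem.Str.find s pat = PySem.Str.findFrom s pat ((0 : Nat) : Int) none := by
    simp [PySem.Chars.findFrom_zero]
  rw [pvOcc, h0, occAux_spec s pat hpat _ 0 (by omega) (by omega)]
  norm_num

-- A's slice comparison is the prefix condition
lemma slice_cond (s pat : String) (hpat : pat.toList.length = 2) (j : Int) (hj : 0 ≤ j) :
    (PySem.Str.slice s (some j) (some (j + 2)) = pat) ↔ pat.toList <+: s.toList.drop j.toNat := by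
  rw [String.ext_iff]
  have : (PySem.Str.slice s (some j) (some (j + 2))).toList
      = (s.toList.drop j.toNat).take 2 := by
    simp [PySem.List.slice_toNat s.toList hj (by omega : (0:Int) ≤ j + 2)]
    congr 1
    omega
  rw [this, List.prefix_iff_eq_take, hpat]
  exact ⟨fun h => h.symm, fun h => h.symm⟩

lemma per_seq (s : String) :
    (PySem.List.pyRange 0 (PySem.Str.len s) 1).foldl (fun p j =>
      let p := if PySem.Str.slice s (some j) (some (j + 2)) = "GT" then (p.1 ++ [j], p.2) else p
      if PySem.Str.slice s (some j) (some (j + 2)) = "AG" then (p.1, p.2 ++ [j + 1]) else p)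
      (([], []) : List Int × List Int)
    = (pvOcc s "GT", (pvOcc s "AG").map (· + 1)) := by
  rw [foldl_pair_append]
  have hfil : ∀ pat : String, pat.toList.length = 2 →
      (PySem.List.pyRange 0 (PySem.Str.len s) 1).filter
        (fun j => decide (PySem.Str.slice s (some j) (some (j + 2)) = pat))
      = pvOcc s pat := by
    intro pat hpat
    rw [occ_spec s pat (by intro h; rw [h] at hpat; simp at hpat)]
    have hlen : PySem.Str.len s = (s.toList.length : Int) := by simp
    rw [hlen]
    apply List.filter_congr
    intro j hj
    have hmem := (PySem.List.mem_pyRange_one).mp hj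
    simp only [decide_eq_decide]
    exact slice_cond s pat hpat j hmem.1
  rw [hfil "GT" (by decide), hfil "AG" (by decide)]
  simp

-- ===== VERDICT (by name: the statement is the Claim_ definition above) =====
theorem splice_sites_spec : Claim_equal_splice_sites := by
  intro seqs _
  show splice_sites seqs = splice_sites_alt seqs
  unfold splice_sites splice_sites_alt
  rw [PySem.List.foldl_pyRange_zero_pyGetD' seqs ""
      (fun acc s =>
        let da := (PySem.List.pyRange 0 (PySem.Str.len s) 1).foldl (fun p j =>
          let p := if PySem.Str.slice s (some j) (some (j + 2)) = "GT" then (p.1 ++ [j], p.2) else p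
          if PySem.Str.slice s (some j) (some (j + 2)) = "AG" then (p.1, p.2 ++ [j + 1]) else p)
          ([], [])
        (acc.1 ++ [da.1], acc.2.1 ++ [da.2], acc.2.2 ++ [PySem.Str.len s])) ([], [], [])]
  congr 1
  funext acc s
  simp only [per_seq s]
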